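-- pv_equiv track=rewrite | github.com/mostafachegeni/Cardano-SSM-Untangling | cardano_ssm_untangling.py | calculate_minimal_pairs
-- ===== SOURCE A (Python) =====
-- def calculate_minimal_pairs(conn_pairs_list):
--     n = len(conn_pairs_list)
--
--     # Initialize a boolean list with the same length as conn_pairs_list
--     remove_flags = [False] * n
--
--     for i in range(n):
--         a1, b1 = conn_pairs_list[i]
--
--         # Avoid redundant checks and ensure not already flagged for removal
--         if not remove_flags[i]:
--             for j in range(i+1, n):
--                 a2, b2 = conn_pairs_list[j]
--
--                 if   (a1 & a2 == a1) and (b1 & b2 == b1):  # Check if (a1,b1) ⊆ (a2,b2)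
--                     remove_flags[j] = True
--                 elif (a1 & a2 == a2) and (b1 & b2 == b2):  # Check if (a2,b2) ⊆ (a1,b1)
--                     remove_flags[i] = True
--
--     # Create a new list excluding pairs flagged for removal
--     minimal_pairs = [pair for index, pair in enumerate(conn_pairs_list) if not remove_flags[index]]
--
--     return minimal_pairs;
-- ===== SOURCE B (Python) =====
-- def calculate_minimal_pairs(conn_pairs_list):
--     def dominated(i, p):
--         a1, b1 = p
--         return any((a1 & a2 == a2) and (b1 & b2 == b2) and ((a2, b2) != p or j < i)
--                    for j, (a2, b2) in enumerate(conn_pairs_list))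
--     return [p for i, p in enumerate(conn_pairs_list) if not dominated(i, p)]
-- ===== Notes on version B (the rewrite author's own statement) =====
-- stated objective: simpler
-- what changed: Replaces the mutating triangular flag-propagation pass with an independent per-pair domination test: keep a pair iff no other pair is a componentwise bitwise subset of it, an equal pair counting only when it occurs at an earlier index; correctness of dropping the flag array rests on transitivity of the subset order.
import Mathlib
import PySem

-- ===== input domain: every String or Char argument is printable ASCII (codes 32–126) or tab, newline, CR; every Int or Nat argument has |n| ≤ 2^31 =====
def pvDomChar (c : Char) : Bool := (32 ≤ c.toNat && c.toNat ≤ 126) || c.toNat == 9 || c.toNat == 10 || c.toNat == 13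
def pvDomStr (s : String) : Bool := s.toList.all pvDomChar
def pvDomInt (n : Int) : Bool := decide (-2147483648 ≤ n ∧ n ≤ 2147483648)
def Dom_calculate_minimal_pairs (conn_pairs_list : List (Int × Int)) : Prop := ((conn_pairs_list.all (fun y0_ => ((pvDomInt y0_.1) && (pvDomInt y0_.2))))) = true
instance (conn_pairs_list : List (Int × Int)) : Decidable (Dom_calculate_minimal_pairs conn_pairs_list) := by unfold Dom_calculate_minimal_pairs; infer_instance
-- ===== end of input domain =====

-- B replaces A's mutating triangular flag-propagation pass by an independent
-- per-pair domination test (simpler decomposition, same O(n^2) cost).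


-- ===== PORT A =====
-- (a1 & a2 == a1) and (b1 & b2 == b1), i.e. "p is a bitwise subset of q"
def pvSubset (p q : Int × Int) : Bool :=
  (PySem.Int.band p.1 q.1 == p.1) && (PySem.Int.band p.2 q.2 == p.2)

-- body of A's inner `for j in range(i+1, n)` loop (flags list is the fold state)
def pvStepInner (xs : List (Int × Int)) (i : Nat) (fl : List Bool) (j : Nat) : List Bool :=
  if pvSubset (xs.getD i (0, 0)) (xs.getD j (0, 0)) then fl.set j true
  else if pvSubset (xs.getD j (0, 0)) (xs.getD i (0, 0)) then fl.set i true
  else fl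

-- body of A's outer `for i in range(n)` loop, incl. the `if not remove_flags[i]` skip
def pvStepOuter (xs : List (Int × Int)) (fl : List Bool) (i : Nat) : List Bool :=
  if fl.getD i false = false then
    (List.range' (i + 1) (xs.length - (i + 1))).foldl (pvStepInner xs i) fl
  else fl

def calculate_minimal_pairs (conn_pairs_list : List (Int × Int)) : List (Int × Int) :=
  let n := conn_pairs_list.length
  let flags := (List.range n).foldl (pvStepOuter conn_pairs_list) (List.replicate n false)
  ((conn_pairs_list.zipIdx).filter (fun pi => !(flags.getD pi.2 false))).map (·.1)

-- ===== PORT B =====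
-- any((a1 & a2 == a2) and (b1 & b2 == b2) and ((a2,b2) != p or j < i) for j,(a2,b2) in enumerate(...))
def pvAnyDominator (xs : List (Int × Int)) (i : Nat) (p : Int × Int) : Bool :=
  xs.zipIdx.any (fun qj =>
    (PySem.Int.band p.1 qj.1.1 == qj.1.1) && (PySem.Int.band p.2 qj.1.2 == qj.1.2) &&
    (qj.1 != p || decide (qj.2 < i)))

def calculate_minimal_pairs_alt (conn_pairs_list : List (Int × Int)) : List (Int × Int) :=
  ((conn_pairs_list.zipIdx).filter
    (fun pi => !(pvAnyDominator conn_pairs_list pi.2 pi.1))).map (·.1)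

-- ===== PRECONDITION & SPEC =====
def Spec_calculate_minimal_pairs (conn_pairs_list : List (Int × Int)) (out : List (Int × Int)) : Prop := out = calculate_minimal_pairs_alt conn_pairs_list
instance (conn_pairs_list : List (Int × Int)) (out : List (Int × Int)) : Decidable (Spec_calculate_minimal_pairs conn_pairs_list out) := by unfold Spec_calculate_minimal_pairs; infer_instance

-- ===== CLAIM (what is proved, stated in full; the proofs are below) =====
def Claim_equal_calculate_minimal_pairs : Prop := ∀ (conn_pairs_list : List (Int × Int)), Dom_calculate_minimal_pairs conn_pairs_list → Spec_calculate_minimal_pairs conn_pairs_list (calculate_minimal_pairs conn_pairs_list)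

-- ===== LEMMAS AND PROOFS =====

-- ---- Nat-level bitwise facts --------------------------------------------------

theorem pv_land_add_ldiff (m : Nat) : ∀ n, (m &&& n) + Nat.ldiff m n = m := by
  induction m using Nat.binaryRec with
  | zero =>
    intro n
    simp [Nat.ldiff]
  | bit b m ih =>
    intro n
    conv_lhs => rw [← Nat.bit_bodd_div2 n]
    rw [Nat.land_bit, Nat.ldiff_bit]
    simp only [Nat.bit_val]
    have := ih n.div2
    cases b <;> cases n.bodd <;> simp <;> omega

theorem pv_sub_land (m n : Nat) : m - (m &&& n) = Nat.ldiff m n := by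
  have h := pv_land_add_ldiff m n
  omega

theorem pv_nat_and_trans {x y z : Nat} (h1 : x &&& y = x) (h2 : y &&& z = y) :
    x &&& z = x := by
  apply Nat.eq_of_testBit_eq; intro k
  have e1 := congrArg (fun t => t.testBit k) h1
  have e2 := congrArg (fun t => t.testBit k) h2
  simp only [Nat.testBit_and] at e1 e2 ⊢
  revert e1 e2; cases x.testBit k <;> cases y.testBit k <;> cases z.testBit k <;> simp

theorem pv_nat_and_ldiff_trans {x y c : Nat} (h1 : x &&& y = x) (h2 : Nat.ldiff y c = y) :
    Nat.ldiff x c = x := by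
  apply Nat.eq_of_testBit_eq; intro k
  have e1 := congrArg (fun t => t.testBit k) h1
  have e2 := congrArg (fun t => t.testBit k) h2
  simp only [Nat.testBit_and, Nat.testBit_ldiff] at e1 e2 ⊢
  revert e1 e2; cases x.testBit k <;> cases y.testBit k <;> cases c.testBit k <;> simp

theorem pv_nat_ldiff_or_trans {x b c : Nat} (h1 : Nat.ldiff x b = x) (h2 : b ||| c = b) :
    Nat.ldiff x c = x := by
  apply Nat.eq_of_testBit_eq; intro k
  have e1 := congrArg (fun t => t.testBit k) h1
  have e2 := congrArg (fun t => t.testBit k) h2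
  simp only [Nat.testBit_or, Nat.testBit_ldiff] at e1 e2 ⊢
  revert e1 e2; cases x.testBit k <;> cases b.testBit k <;> cases c.testBit k <;> simp

theorem pv_nat_or_trans {a b c : Nat} (h1 : a ||| b = a) (h2 : b ||| c = b) :
    a ||| c = a := by
  apply Nat.eq_of_testBit_eq; intro k
  have e1 := congrArg (fun t => t.testBit k) h1
  have e2 := congrArg (fun t => t.testBit k) h2
  simp only [Nat.testBit_or] at e1 e2 ⊢
  revert e1 e2; cases a.testBit k <;> cases b.testBit k <;> cases c.testBit k <;> simp

-- ---- band: case formulas and order properties --------------------------------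

theorem pv_band_nn {a b : Int} (ha : 0 ≤ a) (hb : 0 ≤ b) :
    PySem.Int.band a b = ((a.toNat &&& b.toNat : Nat) : Int) := by
  unfold PySem.Int.band
  rw [if_pos ha, if_pos hb]

theorem pv_band_np {a b : Int} (ha : 0 ≤ a) (hb : b < 0) :
    PySem.Int.band a b = ((Nat.ldiff a.toNat (-b - 1).toNat : Nat) : Int) := by
  unfold PySem.Int.band
  rw [if_pos ha, if_neg (by omega), ← pv_sub_land]

theorem pv_band_pn {a b : Int} (ha : a < 0) (hb : 0 ≤ b) :
    PySem.Int.band a b = ((Nat.ldiff b.toNat (-a - 1).toNat : Nat) : Int) := by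
  unfold PySem.Int.band
  rw [if_neg (by omega), if_pos hb, ← pv_sub_land]

theorem pv_band_pp {a b : Int} (ha : a < 0) (hb : b < 0) :
    PySem.Int.band a b = -((((-a - 1).toNat ||| (-b - 1).toNat : Nat)) : Int) - 1 := by
  unfold PySem.Int.band
  rw [if_neg (by omega), if_neg (by omega)]

theorem pv_band_trans {a b c : Int} (h1 : PySem.Int.band a b = a)
    (h2 : PySem.Int.band b c = b) : PySem.Int.band a c = a := by
  rcases (by omega : 0 ≤ a ∨ a < 0) with ha | ha <;> rcases (by omega : 0 ≤ b ∨ b < 0) with hb | hb <;>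
    rcases (by omega : 0 ≤ c ∨ c < 0) with hc | hc
  · -- a≥0 b≥0 c≥0
    rw [pv_band_nn ha hb] at h1; rw [pv_band_nn hb hc] at h2; rw [pv_band_nn ha hc]
    have n1 : a.toNat &&& b.toNat = a.toNat := by omega
    have n2 : b.toNat &&& c.toNat = b.toNat := by omega
    rw [pv_nat_and_trans n1 n2]; omega
  · -- a≥0 b≥0 c<0
    rw [pv_band_nn ha hb] at h1; rw [pv_band_np hb hc] at h2; rw [pv_band_np ha hc]
    have n1 : a.toNat &&& b.toNat = a.toNat := by omega
    have n2 : Nat.ldiff b.toNat (-c - 1).toNat = b.toNat := by omega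
    rw [pv_nat_and_ldiff_trans n1 n2]; omega
  · -- a≥0 b<0 c≥0 : h2 impossible (band b c ≥ 0 > b)
    rw [pv_band_pn hb hc] at h2; omega
  · -- a≥0 b<0 c<0
    rw [pv_band_np ha hb] at h1; rw [pv_band_pp hb hc] at h2; rw [pv_band_np ha hc]
    have n1 : Nat.ldiff a.toNat (-b - 1).toNat = a.toNat := by omega
    have n2 : (-b - 1).toNat ||| (-c - 1).toNat = (-b - 1).toNat := by omega
    rw [pv_nat_ldiff_or_trans n1 n2]; omega
  · -- a<0 b≥0 : h1 impossible
    rw [pv_band_pn ha hb] at h1; omega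
  · rw [pv_band_pn ha hb] at h1; omega
  · -- a<0 b<0 c≥0 : h2 impossible
    rw [pv_band_pn hb hc] at h2; omega
  · -- a<0 b<0 c<0
    rw [pv_band_pp ha hb] at h1; rw [pv_band_pp hb hc] at h2; rw [pv_band_pp ha hc]
    have n1 : (-a - 1).toNat ||| (-b - 1).toNat = (-a - 1).toNat := by omega
    have n2 : (-b - 1).toNat ||| (-c - 1).toNat = (-b - 1).toNat := by omega
    rw [pv_nat_or_trans n1 n2]; omega

-- ---- pvSubset order ----------------------------------------------------------

theorem pvSubset_refl (p : Int × Int) : pvSubset p p = true := by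
  simp [pvSubset, PySem.Int.band_self]

theorem pvSubset_antisymm {p q : Int × Int} (h1 : pvSubset p q = true)
    (h2 : pvSubset q p = true) : p = q := by
  simp only [pvSubset, Bool.and_eq_true, beq_iff_eq] at h1 h2
  rw [PySem.Int.band_comm q.1 p.1, PySem.Int.band_comm q.2 p.2] at h2
  obtain ⟨ha1, hb1⟩ := h1
  obtain ⟨ha2, hb2⟩ := h2
  exact Prod.ext (by rw [← ha1, ha2]) (by rw [← hb1, hb2])

theorem pvSubset_trans {p q r : Int × Int} (h1 : pvSubset p q = true)
    (h2 : pvSubset q r = true) : pvSubset p r = true := by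
  simp only [pvSubset, Bool.and_eq_true, beq_iff_eq] at h1 h2 ⊢
  exact ⟨pv_band_trans h1.1 h2.1, pv_band_trans h1.2 h2.2⟩

-- ---- the domination predicate ------------------------------------------------

def pvP (xs : List (Int × Int)) (i : Nat) : Int × Int := xs.getD i (0, 0)

def pvHasDominator (xs : List (Int × Int)) (m : Nat) : Prop :=
  ∃ k, k < xs.length ∧ pvSubset (pvP xs k) (pvP xs m) = true ∧
    (pvP xs k ≠ pvP xs m ∨ k < m)

-- which flag a single inner-step body sets, given (i, j)
theorem pvP_def (xs : List (Int × Int)) (t : Nat) : xs.getD t (0, 0) = pvP xs t := rfl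

def pvHit (xs : List (Int × Int)) (i j t : Nat) : Prop :=
  (pvSubset (pvP xs i) (pvP xs j) = true ∧ t = j) ∨
  (pvSubset (pvP xs i) (pvP xs j) = false ∧ pvSubset (pvP xs j) (pvP xs i) = true ∧ t = i)

-- ---- basic getD/set facts ----------------------------------------------------

theorem pv_getD_set_true {fl : List Bool} {j t : Nat} :
    (fl.set j true).getD t false = true ↔
      (j = t ∧ j < fl.length) ∨ fl.getD t false = true := by
  by_cases hj : j = t
  · subst hj
    by_cases hl : j < fl.length
    · simp [List.getD_eq_getElem?_getD, hl]
    · rw [List.set_eq_of_length_le (by omega)]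
      simp [hl]
  · simp [List.getD_eq_getElem?_getD, hj]

theorem pvStepInner_length (xs : List (Int × Int)) (i : Nat) (fl : List Bool) (j : Nat) :
    (pvStepInner xs i fl j).length = fl.length := by
  unfold pvStepInner
  split_ifs <;> simp

theorem pvStepInner_mono (xs : List (Int × Int)) (i : Nat) (fl : List Bool) (j t : Nat)
    (h : fl.getD t false = true) : (pvStepInner xs i fl j).getD t false = true := by
  unfold pvStepInner
  split_ifs
  · exact pv_getD_set_true.mpr (Or.inr h)
  · exact pv_getD_set_true.mpr (Or.inr h)
  · exact h

theorem pv_getD_set_self {fl : List Bool} {j : Nat} (h : j < fl.length) :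
    (fl.set j true).getD j false = true := by
  exact pv_getD_set_true.mpr (Or.inl ⟨rfl, h⟩)

-- ---- inner fold --------------------------------------------------------------

theorem pv_inner_length (xs : List (Int × Int)) (i : Nat) (js : List Nat)
    (fl : List Bool) : (js.foldl (pvStepInner xs i) fl).length = fl.length := by
  induction js generalizing fl with
  | nil => rfl
  | cons j js ih => rw [List.foldl_cons, ih, pvStepInner_length]

theorem pv_inner_mono (xs : List (Int × Int)) (i : Nat) (js : List Nat)
    (fl : List Bool) (t : Nat) (h : fl.getD t false = true) :
    (js.foldl (pvStepInner xs i) fl).getD t false = true := by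
  induction js generalizing fl with
  | nil => exact h
  | cons j js ih =>
    rw [List.foldl_cons]
    exact ih _ (pvStepInner_mono xs i fl j t h)

theorem pv_inner_sound (xs : List (Int × Int)) (i : Nat) (js : List Nat)
    (fl : List Bool) (t : Nat)
    (h : (js.foldl (pvStepInner xs i) fl).getD t false = true) :
    fl.getD t false = true ∨ ∃ j ∈ js, pvHit xs i j t := by
  induction js generalizing fl with
  | nil => exact Or.inl h
  | cons j js ih =>
    rw [List.foldl_cons] at h
    rcases ih _ h with h' | ⟨j', hm, hh⟩
    · unfold pvStepInner at h'
      split_ifs at h' with c1 c2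
      · rcases pv_getD_set_true.mp h' with ⟨hjt, _⟩ | hold
        · exact Or.inr ⟨j, List.mem_cons_self, Or.inl ⟨c1, hjt.symm⟩⟩
        · exact Or.inl hold
      · rcases pv_getD_set_true.mp h' with ⟨hit', _⟩ | hold
        · exact Or.inr ⟨j, List.mem_cons_self,
            Or.inr ⟨Bool.not_eq_true _ ▸ (Bool.eq_false_iff.mpr (fun hc => c1 hc)), c2, hit'.symm⟩⟩
        · exact Or.inl hold
      · exact Or.inl h'
    · exact Or.inr ⟨j', List.mem_cons_of_mem _ hm, hh⟩

theorem pv_inner_hit_j (xs : List (Int × Int)) (i : Nat) (js : List Nat)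
    (fl : List Bool) (j0 : Nat) (hmem : j0 ∈ js) (hlen : j0 < fl.length)
    (hsub : pvSubset (pvP xs i) (pvP xs j0) = true) :
    (js.foldl (pvStepInner xs i) fl).getD j0 false = true := by
  induction js generalizing fl with
  | nil => cases hmem
  | cons j js ih =>
    rw [List.foldl_cons]
    rcases List.mem_cons.mp hmem with rfl | hm
    · apply pv_inner_mono
      unfold pvStepInner
      simp only [pvP_def]
      rw [if_pos hsub]
      exact pv_getD_set_self hlen
    · exact ih _ hm (by rw [pvStepInner_length]; exact hlen)

theorem pv_inner_hit_i (xs : List (Int × Int)) (i : Nat) (js : List Nat)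
    (fl : List Bool) (j0 : Nat) (hmem : j0 ∈ js) (hlen : i < fl.length)
    (h1 : pvSubset (pvP xs i) (pvP xs j0) = false)
    (h2 : pvSubset (pvP xs j0) (pvP xs i) = true) :
    (js.foldl (pvStepInner xs i) fl).getD i false = true := by
  induction js generalizing fl with
  | nil => cases hmem
  | cons j js ih =>
    rw [List.foldl_cons]
    rcases List.mem_cons.mp hmem with rfl | hm
    · apply pv_inner_mono
      unfold pvStepInner
      simp only [pvP_def]
      rw [if_neg (by simp [h1]), if_pos h2]
      exact pv_getD_set_self hlen
    · exact ih _ hm (by rw [pvStepInner_length]; exact hlen)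

-- ---- outer fold --------------------------------------------------------------

theorem pv_outer_length (xs : List (Int × Int)) (is : List Nat) (fl : List Bool) :
    (is.foldl (pvStepOuter xs) fl).length = fl.length := by
  induction is generalizing fl with
  | nil => rfl
  | cons i is ih =>
    rw [List.foldl_cons, ih]
    unfold pvStepOuter
    split_ifs
    · rw [pv_inner_length]
    · rfl

theorem pv_outer_mono (xs : List (Int × Int)) (is : List Nat) (fl : List Bool)
    (t : Nat) (h : fl.getD t false = true) :
    (is.foldl (pvStepOuter xs) fl).getD t false = true := by
  induction is generalizing fl with
  | nil => exact h
  | cons i is ih =>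
    rw [List.foldl_cons]
    apply ih
    unfold pvStepOuter
    split_ifs
    · exact pv_inner_mono xs i _ fl t h
    · exact h

theorem pv_outer_sound (xs : List (Int × Int)) (is : List Nat) (fl : List Bool)
    (t : Nat) (h : (is.foldl (pvStepOuter xs) fl).getD t false = true) :
    fl.getD t false = true ∨
      ∃ i ∈ is, ∃ j ∈ List.range' (i + 1) (xs.length - (i + 1)), pvHit xs i j t := by
  induction is generalizing fl with
  | nil => exact Or.inl h
  | cons i is ih =>
    rw [List.foldl_cons] at h
    rcases ih _ h with h' | ⟨i', hm, rest⟩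
    · unfold pvStepOuter at h'
      split_ifs at h' with c
      · rcases pv_inner_sound xs i _ fl t h' with h'' | ⟨j, hj, hh⟩
        · exact Or.inl h''
        · exact Or.inr ⟨i, List.mem_cons_self, j, hj, hh⟩
      · exact Or.inl h'
    · exact Or.inr ⟨i', List.mem_cons_of_mem _ hm, rest⟩

-- hit implies domination
theorem pv_hit_dom (xs : List (Int × Int)) (i j t : Nat) (hj : j < xs.length)
    (hij : i < j) (h : pvHit xs i j t) : pvHasDominator xs t := by
  rcases h with ⟨hsub, heqt⟩ | ⟨hns, hsub, heqt⟩
  · rw [heqt]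
    exact ⟨i, lt_trans hij hj, hsub, Or.inr hij⟩
  · rw [heqt]
    refine ⟨j, hj, hsub, Or.inl fun heq => ?_⟩
    rw [heq] at hsub
    have := pvSubset_refl (pvP xs i)
    rw [heq] at hns
    rw [hns] at this
    cases this

-- a ⊆-minimal, earliest dominator exists
theorem pv_exists_min (xs : List (Int × Int)) (m : Nat) (h : pvHasDominator xs m) :
    ∃ k, k < xs.length ∧ pvSubset (pvP xs k) (pvP xs m) = true ∧
      (pvP xs k ≠ pvP xs m ∨ k < m) ∧
      (∀ k', k' < xs.length → pvSubset (pvP xs k') (pvP xs k) = true → pvP xs k' = pvP xs k) ∧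
      (∀ k', k' < k → pvP xs k' ≠ pvP xs k) := by
  obtain ⟨k0, hk0n, hk0s, hk0d⟩ := h
  suffices H : ∀ N k, k < xs.length → pvSubset (pvP xs k) (pvP xs m) = true →
      (pvP xs k ≠ pvP xs m ∨ k < m) →
      ((Finset.range xs.length).filter
        (fun k' => pvSubset (pvP xs k') (pvP xs k) = true)).card ≤ N →
      ∃ k1, k1 < xs.length ∧ pvSubset (pvP xs k1) (pvP xs m) = true ∧
        (pvP xs k1 ≠ pvP xs m ∨ k1 < m) ∧
        (∀ k', k' < xs.length → pvSubset (pvP xs k') (pvP xs k1) = true → pvP xs k' = pvP xs k1) ∧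
        (∀ k', k' < k1 → pvP xs k' ≠ pvP xs k1) by
    exact H _ k0 hk0n hk0s hk0d le_rfl
  intro N
  induction N with
  | zero =>
    intro k hkn hks hkd hcard
    exfalso
    have hmem : k ∈ (Finset.range xs.length).filter
        (fun k' => pvSubset (pvP xs k') (pvP xs k) = true) := by
      simp [Finset.mem_filter, Finset.mem_range, hkn, pvSubset_refl]
    have := Finset.card_pos.mpr ⟨k, hmem⟩
    omega
  | succ N ih =>
    intro k hkn hks hkd hcard
    by_cases hmin : ∃ k', k' < xs.length ∧ pvSubset (pvP xs k') (pvP xs k) = true ∧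
        pvP xs k' ≠ pvP xs k
    · obtain ⟨k', hk'n, hk's, hk'ne⟩ := hmin
      have hsub' : pvSubset (pvP xs k') (pvP xs m) = true := pvSubset_trans hk's hks
      have hd' : pvP xs k' ≠ pvP xs m ∨ k' < m := by
        left
        intro heq
        exact hk'ne (pvSubset_antisymm hk's (heq ▸ hks))
      have hsubset : (Finset.range xs.length).filter
            (fun x => pvSubset (pvP xs x) (pvP xs k') = true) ⊆
          (Finset.range xs.length).filter
            (fun x => pvSubset (pvP xs x) (pvP xs k) = true) := by
        intro x hx
        simp only [Finset.mem_filter] at hx ⊢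
        exact ⟨hx.1, pvSubset_trans hx.2 hk's⟩
      have hknotin : k ∉ (Finset.range xs.length).filter
          (fun x => pvSubset (pvP xs x) (pvP xs k') = true) := by
        simp only [Finset.mem_filter, Finset.mem_range, not_and]
        intro _ hc
        exact hk'ne (pvSubset_antisymm hk's hc)
      have hkin : k ∈ (Finset.range xs.length).filter
          (fun x => pvSubset (pvP xs x) (pvP xs k) = true) := by
        simp [Finset.mem_filter, Finset.mem_range, hkn, pvSubset_refl]
      have hlt : ((Finset.range xs.length).filter
            (fun x => pvSubset (pvP xs x) (pvP xs k') = true)).card <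
          ((Finset.range xs.length).filter
            (fun x => pvSubset (pvP xs x) (pvP xs k) = true)).card := by
        apply Finset.card_lt_card
        exact (Finset.ssubset_iff_of_subset hsubset).mpr ⟨k, hkin, hknotin⟩
      exact ih k' hk'n hsub' hd' (by omega)
    · push Not at hmin
      have hex : ∃ k2, k2 < xs.length ∧ pvP xs k2 = pvP xs k := ⟨k, hkn, rfl⟩
      refine ⟨Nat.find hex, (Nat.find_spec hex).1, ?_, ?_, ?_, ?_⟩
      · rw [(Nat.find_spec hex).2]; exact hks
      · by_cases heq : pvP xs k = pvP xs m
        · right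
          have hkm : k < m := by
            rcases hkd with hne | hlt
            · exact absurd heq hne
            · exact hlt
          have : Nat.find hex ≤ k := Nat.find_min' hex ⟨hkn, rfl⟩
          omega
        · left
          rw [(Nat.find_spec hex).2]
          exact heq
      · intro k' hk'n hsubk'
        rw [(Nat.find_spec hex).2] at hsubk' ⊢
        exact hmin k' hk'n hsubk'
      · intro k' hk'lt
        have hnot := Nat.find_min hex hk'lt
        have hfn := (Nat.find_spec hex).1
        push Not at hnot
        rw [(Nat.find_spec hex).2]
        exact hnot (by omega)

def pvFinal (xs : List (Int × Int)) : List Bool :=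
  (List.range xs.length).foldl (pvStepOuter xs) (List.replicate xs.length false)

theorem pvFinal_sound (xs : List (Int × Int)) (t : Nat)
    (h : (pvFinal xs).getD t false = true) : pvHasDominator xs t := by
  rcases pv_outer_sound xs _ _ t h with h' | ⟨i, hi, j, hj, hit⟩
  · simp only [List.getD_eq_getElem?_getD, List.getElem?_replicate] at h'
    split at h' <;> simp at h'
  · have hin : i < xs.length := List.mem_range.mp hi
    have hjr := List.mem_range'_1.mp hj
    exact pv_hit_dom xs i j t (by omega) (by omega) hit

theorem pvStepOuter_mono (xs : List (Int × Int)) (fl : List Bool) (i t : Nat)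
    (h : fl.getD t false = true) : (pvStepOuter xs fl i).getD t false = true := by
  unfold pvStepOuter
  split_ifs
  · exact pv_inner_mono xs i _ fl t h
  · exact h

theorem pv_prefix_length (xs : List (Int × Int)) (r : Nat) :
    ((List.range r).foldl (pvStepOuter xs) (List.replicate xs.length false)).length
      = xs.length := by
  rw [pv_outer_length]; simp

theorem pvStepOuter_of_false (xs : List (Int × Int)) (fl : List Bool) (i : Nat)
    (h : fl.getD i false = false) :
    pvStepOuter xs fl i
      = (List.range' (i + 1) (xs.length - (i + 1))).foldl (pvStepInner xs i) fl := by
  unfold pvStepOuter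
  exact if_pos h

theorem pv_decomp (xs : List (Int × Int)) (r : Nat) (hr : r < xs.length) :
    pvFinal xs = (List.range' (r + 1) (xs.length - (r + 1))).foldl (pvStepOuter xs)
      (pvStepOuter xs
        ((List.range r).foldl (pvStepOuter xs) (List.replicate xs.length false)) r) := by
  unfold pvFinal
  have hsplit : List.range xs.length
      = (List.range r ++ [r]) ++ List.range' (r + 1) (xs.length - (r + 1)) := by
    rw [List.range_succ.symm, List.range_eq_range', List.range_eq_range']
    have h2 : xs.length = (r + 1) + (xs.length - (r + 1)) := by omega
    conv_lhs => rw [h2]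
    have := @List.range'_append 0 (r + 1) (xs.length - (r + 1)) 1
    simp only [Nat.one_mul, Nat.zero_add] at this
    rw [← this]
  rw [hsplit, List.foldl_append, List.foldl_append, List.foldl_cons, List.foldl_nil]

-- flag at a ⊆-minimal, earliest index is still unset when its own iteration starts
theorem pv_pivot_false (xs : List (Int × Int)) (k : Nat) (hkn : k < xs.length)
    (hmin : ∀ k', k' < xs.length → pvSubset (pvP xs k') (pvP xs k) = true →
      pvP xs k' = pvP xs k)
    (hearly : ∀ k', k' < k → pvP xs k' ≠ pvP xs k) :
    ((List.range k).foldl (pvStepOuter xs) (List.replicate xs.length false)).getD k false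
      = false := by
  by_contra hc
  have hc' : ((List.range k).foldl (pvStepOuter xs)
      (List.replicate xs.length false)).getD k false = true := by
    revert hc
    cases ((List.range k).foldl (pvStepOuter xs)
      (List.replicate xs.length false)).getD k false <;> simp
  rcases pv_outer_sound xs _ _ k hc' with h' | ⟨i, hi, j, hj, hit⟩
  · simp only [List.getD_eq_getElem?_getD, List.getElem?_replicate] at h'
    split at h' <;> simp at h'
  · have hik : i < k := List.mem_range.mp hi
    have hjr := List.mem_range'_1.mp hj
    rcases hit with ⟨hsub, heq⟩ | ⟨hns, hsub, heq⟩
    · rw [← heq] at hsub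
      exact hearly i hik (hmin i (by omega) hsub)
    · omega

theorem pvFinal_complete (xs : List (Int × Int)) (m : Nat) (hm : m < xs.length)
    (h : pvHasDominator xs m) : (pvFinal xs).getD m false = true := by
  obtain ⟨k, hkn, hks, hkd, hmin, hearly⟩ := pv_exists_min xs m h
  have hkm : k ≠ m := by
    intro heq
    subst heq
    rcases hkd with hne | hlt
    · exact hne rfl
    · omega
  rcases Nat.lt_or_ge k m with hlt | hge
  · -- k < m : iteration k flags m via the first branch
    rw [pv_decomp xs k hkn]
    have hflk := pv_pivot_false xs k hkn hmin hearly
    rw [pvStepOuter_of_false xs _ k hflk]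
    apply pv_outer_mono
    apply pv_inner_hit_j xs k _ _ m
    · exact List.mem_range'_1.mpr ⟨by omega, by omega⟩
    · rw [pv_prefix_length]; exact hm
    · exact hks
  · -- m < k : iteration m flags m via the elif branch at j = k
    have hmk : m < k := by omega
    rw [pv_decomp xs m hm]
    by_cases hflm : ((List.range m).foldl (pvStepOuter xs)
        (List.replicate xs.length false)).getD m false = true
    · exact pv_outer_mono xs _ _ m (pvStepOuter_mono xs _ m m hflm)
    · have hflm' : ((List.range m).foldl (pvStepOuter xs)
          (List.replicate xs.length false)).getD m false = false := by
        revert hflm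
        cases ((List.range m).foldl (pvStepOuter xs)
          (List.replicate xs.length false)).getD m false <;> simp
      rw [pvStepOuter_of_false xs _ m hflm']
      apply pv_outer_mono
      apply pv_inner_hit_i xs m _ _ k
      · exact List.mem_range'_1.mpr ⟨by omega, by omega⟩
      · rw [pv_prefix_length]; exact hm
      · by_cases hpm : pvSubset (pvP xs m) (pvP xs k) = true
        · exfalso
          have heq := pvSubset_antisymm hpm hks
          rcases hkd with hne | hlt2
          · exact hne heq.symm
          · omega
        · revert hpm
          cases pvSubset (pvP xs m) (pvP xs k) <;> simp
      · exact hks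

theorem pvFinal_iff (xs : List (Int × Int)) (m : Nat) (hm : m < xs.length) :
    (pvFinal xs).getD m false = true ↔ pvHasDominator xs m :=
  ⟨pvFinal_sound xs m, pvFinal_complete xs m hm⟩

-- B's per-element test computes the same predicate
theorem pvAnyDominator_iff (xs : List (Int × Int)) (i : Nat) (p : Int × Int)
    (hi : i < xs.length) (hp : xs[i] = p) :
    pvAnyDominator xs i p = true ↔ pvHasDominator xs i := by
  have hPi : pvP xs i = p := by
    rw [pvP, List.getD_eq_getElem xs (0, 0) hi, hp]
  unfold pvAnyDominator
  rw [List.any_eq_true]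
  constructor
  · rintro ⟨⟨q, j⟩, hmem, hpred⟩
    have hj := List.mem_zipIdx hmem
    simp only [Nat.zero_le, Nat.zero_add, Nat.sub_zero, true_and] at hj
    obtain ⟨hjlen, hq⟩ := hj
    have hPj : pvP xs j = q := by
      rw [pvP, List.getD_eq_getElem xs (0, 0) hjlen, hq]
    simp only [Bool.and_eq_true, beq_iff_eq, Bool.or_eq_true, bne_iff_ne,
      decide_eq_true_eq] at hpred
    obtain ⟨⟨h1, h2⟩, h3⟩ := hpred
    refine ⟨j, hjlen, ?_, ?_⟩
    · rw [hPj, hPi]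
      simp only [pvSubset, Bool.and_eq_true, beq_iff_eq]
      rw [PySem.Int.band_comm q.1 p.1, PySem.Int.band_comm q.2 p.2]
      exact ⟨h1, h2⟩
    · rw [hPj, hPi]
      exact h3
  · rintro ⟨k, hk, hsub, hd⟩
    have hPk : pvP xs k = xs[k] := by
      rw [pvP, List.getD_eq_getElem xs (0, 0) hk]
    refine ⟨(xs[k], k), ?_, ?_⟩
    · have hlen : k < xs.zipIdx.length := by simp [hk]
      have hget : xs.zipIdx[k] = (xs[k], k) := by simp
      rw [← hget]
      exact List.getElem_mem hlen
    · rw [hPk, hPi] at hsub hd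
      simp only [pvSubset, Bool.and_eq_true, beq_iff_eq] at hsub
      simp only [Bool.and_eq_true, beq_iff_eq, Bool.or_eq_true, bne_iff_ne,
        decide_eq_true_eq]
      refine ⟨⟨?_, ?_⟩, hd⟩
      · rw [PySem.Int.band_comm p.1 (xs[k]).1]
        exact hsub.1
      · rw [PySem.Int.band_comm p.2 (xs[k]).2]
        exact hsub.2

-- ===== VERDICT (by name: the statement is the Claim_ definition above) =====
theorem calculate_minimal_pairs_spec : Claim_equal_calculate_minimal_pairs := by
  intro xs _
  unfold Spec_calculate_minimal_pairs
  have hA : calculate_minimal_pairs xs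
      = ((xs.zipIdx).filter (fun pi => !((pvFinal xs).getD pi.2 false))).map (·.1) := rfl
  rw [hA]
  unfold calculate_minimal_pairs_alt
  congr 1
  apply List.filter_congr
  intro pi hmem
  obtain ⟨p, i⟩ := pi
  have hj := List.mem_zipIdx hmem
  simp only [Nat.zero_le, Nat.zero_add, Nat.sub_zero, true_and] at hj
  obtain ⟨hi, hp⟩ := hj
  have hiff : ((pvFinal xs).getD i false = true) ↔ (pvAnyDominator xs i p = true) :=
    (pvFinal_iff xs i hi).trans (pvAnyDominator_iff xs i p hi hp.symm).symm
  cases hb1 : (pvFinal xs).getD i false <;> cases hb2 : pvAnyDominator xs i p <;> simp_all
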